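-- pv_equiv track=rewrite | github.com/aryan2159/CO_Group-116 | Group_116_Aryan2024128/Assembly.py | parse_assembly
-- ===== SOURCE A (Python) =====
-- def parse_assembly(lines):
--     labels = {}
--     variables = {}
--     instructions = []
--     var_address = 256
--
--
--     memory_address = 0
--     for line in lines:
--         line = line.strip()
--         if not line or line.startswith("#") or line.startswith("var"):
--             continue
--
--         label = None
--         if ':' in line:
--             possible_label, sep, rest = line.partition(':')
--             possible_label = possible_label.strip()
--             rest = rest.strip()
--             if possible_label and ' ' not in possible_label:
--                 label = possible_label
--                 line = rest
--
--         tokens = []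
--         for token in line.split():
--             split_tokens = token.replace(',', ' ').replace('(', ' ').replace(')', ' ').split()
--             tokens.extend(split_tokens)
--
--         if label is not None:
--             labels[label] = memory_address
--
--         if tokens:
--             memory_address += 1
--
--
--     memory_address = 0
--     for line in lines:
--         line = line.strip()
--         if not line or line.startswith("#"):
--             continue
--
--         if line.startswith("var"):
--             parts = line.split()
--             variables[parts[1]] = var_address
--             var_address += 1
--             continue
--
--         label = None
--         if ':' in line:
--             possible_label, sep, rest = line.partition(':')
--             possible_label = possible_label.strip()
--             rest = rest.strip()
--             if possible_label and ' ' not in possible_label: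
--                 label = possible_label
--                 line = rest
--
--         tokens = []
--         for token in line.split():
--             split_tokens = token.replace(',', ' ').replace('(', ' ').replace(')', ' ').split()
--             tokens.extend(split_tokens)
--
--         if tokens:
--             if tokens[0] in ["lw", "sw"] and len(tokens) >= 3:
--                 parts = tokens[-1].split('(')
--                 if len(parts) == 2:
--                     offset = parts[0]
--                     base_reg = parts[1].strip(')')
--                     tokens = tokens[:-1] + [offset, base_reg]
--             instructions.append(tokens)
--             memory_address += 1
--
--     return instructions, labels, variables
-- ===== SOURCE B (Python) =====
-- def parse_assembly(lines):
--     labels = {}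
--     variables = {}
--     instructions = []
--     var_address = 256
--     memory_address = 0
--     for raw in lines:
--         line = raw.strip()
--         if not line or line.startswith("#"):
--             continue
--         if line.startswith("var"):
--             variables[line.split()[1]] = var_address
--             var_address += 1
--             continue
--         label = None
--         if ':' in line:
--             possible_label, _, rest = line.partition(':')
--             possible_label = possible_label.strip()
--             rest = rest.strip()
--             if possible_label and ' ' not in possible_label:
--                 label = possible_label
--                 line = rest
--         tokens = []
--         for token in line.split():
--             tokens.extend(token.replace(',', ' ').replace('(', ' ').replace(')', ' ').split())
--         if label is not None:
--             labels[label] = memory_address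
--         if tokens:
--             instructions.append(tokens)
--             memory_address += 1
--     return instructions, labels, variables
-- ===== Notes on version B (the rewrite author's own statement) =====
-- stated objective: simpler
-- what changed: B replaces A's two full scans of the lines (one for labels/addresses, one for instructions/variables) with a single pass that maintains all five pieces of state at once, and drops A's unreachable lw/sw offset-splitting block (tokens can never contain '(' because tokenization already replaced parentheses with spaces).
import Mathlib
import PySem

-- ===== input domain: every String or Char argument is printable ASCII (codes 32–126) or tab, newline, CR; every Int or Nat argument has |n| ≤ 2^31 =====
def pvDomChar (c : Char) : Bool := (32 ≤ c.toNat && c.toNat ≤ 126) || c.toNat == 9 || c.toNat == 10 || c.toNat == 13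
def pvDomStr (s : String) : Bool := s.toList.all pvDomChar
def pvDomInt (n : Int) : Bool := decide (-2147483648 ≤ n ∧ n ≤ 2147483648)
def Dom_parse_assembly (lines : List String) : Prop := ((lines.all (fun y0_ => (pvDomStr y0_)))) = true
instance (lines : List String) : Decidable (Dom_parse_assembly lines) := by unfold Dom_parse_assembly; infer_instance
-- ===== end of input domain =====

-- B is a simpler single-pass rewrite of A's two-pass parser; it also omits A's
-- unreachable lw/sw offset-splitting block (proved dead below). Return values only; no mutation.

-- ===== PORT A =====
-- shared helper: the tokenization both Pythons perform verbatim
-- (for token in line.split(): tokens.extend(token.replace(',',' ').replace('(',' ').replace(')',' ').split()))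
def pvTokenize (line : String) : List String :=
  (PySem.Str.split₀ line).foldl
    (fun acc token =>
      acc ++ PySem.Str.split₀
        (PySem.Str.replace (PySem.Str.replace (PySem.Str.replace token "," " ") "(" " ") ")" " ")) []

-- shared helper: the label extraction both Pythons perform verbatim
-- (if ':' in line: possible_label, sep, rest = line.partition(':'); … exact for the 1-char separator)
def pvSplitLabel (line : String) : Option String × String :=
  if PySem.Str.isIn ":" line = true then
    let i := (PySem.Str.find line ":").toNat
    let possible := PySem.Str.strip (String.ofList (line.toList.take i))
    let rest := PySem.Str.strip (String.ofList (line.toList.drop (i + 1)))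
    if possible ≠ "" ∧ PySem.Str.isIn " " possible = false then (some possible, rest)
    else (none, line)
  else (none, line)

-- A, pass 1: (labels, memory_address)
def pvStepA1 (st : PySem.Dict String Int × Int) (line : String) : PySem.Dict String Int × Int :=
  let l := PySem.Str.strip line
  if l == "" || PySem.Str.startswith l "#" || PySem.Str.startswith l "var" then st
  else
    let toks := pvTokenize (pvSplitLabel l).2
    let labels := match (pvSplitLabel l).1 with
      | some lab => st.1.insert lab st.2
      | none => st.1
    (labels, if toks.isEmpty then st.2 else st.2 + 1)

-- A, pass 2 helper: A's lw/sw last-token offset/base rewrite, verbatim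
-- (tokens[0] in ["lw","sw"] and len(tokens) >= 3; parts = tokens[-1].split('('); …)
def pvLwswFix (toks : List String) : List String :=
  if (PySem.List.pyGetD toks 0 "" == "lw" || PySem.List.pyGetD toks 0 "" == "sw") && decide (3 ≤ toks.length) then
    match PySem.Str.split? (PySem.List.pyGetD toks (-1) "") "(" with
    | some parts =>
      if parts.length == 2 then
        PySem.List.slice toks none (some (-1)) ++
          [PySem.List.pyGetD parts 0 "", PySem.Str.stripChars (PySem.List.pyGetD parts 1 "") ")"]
      else toks
    | none => toks
  else toks

-- A, pass 2: (variables, instructions, var_address, memory_address)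
def pvStepA2 (st : PySem.Dict String Int × List (List String) × Int × Int) (line : String) :
    PySem.Dict String Int × List (List String) × Int × Int :=
  let l := PySem.Str.strip line
  if l == "" || PySem.Str.startswith l "#" then st
  else if PySem.Str.startswith l "var" then
    (st.1.insert (PySem.List.pyGetD (PySem.Str.split₀ l) 1 "") st.2.2.1, st.2.1, st.2.2.1 + 1, st.2.2.2)
  else
    let toks := pvTokenize (pvSplitLabel l).2
    if toks.isEmpty then st
    else (st.1, st.2.1 ++ [pvLwswFix toks], st.2.2.1, st.2.2.2 + 1)

def parse_assembly (lines : List String) : List (List String) × (List (String × Int)) × (List (String × Int)) :=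
  let r1 := lines.foldl pvStepA1 (PySem.Dict.empty, 0)
  let r2 := lines.foldl pvStepA2 (PySem.Dict.empty, [], 256, 0)
  (r2.2.1, r1.1.items, r2.1.items)

-- ===== PORT B =====
-- B, single pass: (instructions, labels, variables, var_address, memory_address)
def pvStepB (st : List (List String) × PySem.Dict String Int × PySem.Dict String Int × Int × Int)
    (line : String) : List (List String) × PySem.Dict String Int × PySem.Dict String Int × Int × Int :=
  let l := PySem.Str.strip line
  if l == "" || PySem.Str.startswith l "#" then st
  else if PySem.Str.startswith l "var" then
    (st.1, st.2.1, st.2.2.1.insert (PySem.List.pyGetD (PySem.Str.split₀ l) 1 "") st.2.2.2.1,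
      st.2.2.2.1 + 1, st.2.2.2.2)
  else
    let toks := pvTokenize (pvSplitLabel l).2
    let labels := match (pvSplitLabel l).1 with
      | some lab => st.2.1.insert lab st.2.2.2.2
      | none => st.2.1
    if toks.isEmpty then (st.1, labels, st.2.2.1, st.2.2.2.1, st.2.2.2.2)
    else (st.1 ++ [toks], labels, st.2.2.1, st.2.2.2.1, st.2.2.2.2 + 1)

def parse_assembly_alt (lines : List String) : List (List String) × (List (String × Int)) × (List (String × Int)) :=
  let r := lines.foldl pvStepB ([], PySem.Dict.empty, PySem.Dict.empty, 256, 0)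
  (r.1, r.2.1.items, r.2.2.1.items)

-- ===== PRECONDITION & SPEC =====
-- Pre_ excludes exactly the inputs on which A raises IndexError: a line that strips to a
-- non-comment 'var…' directive with fewer than two whitespace-separated tokens (parts[1] is missing).
def Pre_parse_assembly (lines : List String) : Prop :=
  ∀ line ∈ lines,
    ¬ (PySem.Str.strip line ≠ "" ∧ PySem.Str.startswith (PySem.Str.strip line) "#" = false ∧
       PySem.Str.startswith (PySem.Str.strip line) "var" = true ∧
       (PySem.Str.split₀ (PySem.Str.strip line)).length < 2)
instance (lines : List String) : Decidable (Pre_parse_assembly lines) := by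
  unfold Pre_parse_assembly; infer_instance

def pvWitness_parse_assembly : List String :=
  ["start: add r1, r2, r3", "var x", "  # comment", "lw r1, 4(r2)", "foo:"]

def Spec_parse_assembly (lines : List String) (out : List (List String) × (List (String × Int)) × (List (String × Int))) : Prop := out = parse_assembly_alt lines
instance (lines : List String) (out : List (List String) × (List (String × Int)) × (List (String × Int))) : Decidable (Spec_parse_assembly lines out) := by unfold Spec_parse_assembly; infer_instance

-- ===== CLAIM (what is proved, stated in full; the proofs are below) =====
def Claim_equal_parse_assembly : Prop := ∀ (lines : List String), Dom_parse_assembly lines → Pre_parse_assembly lines → Spec_parse_assembly lines (parse_assembly lines)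

-- ===== LEMMAS AND PROOFS =====

-- chars of a replace result come from the source or the replacement
theorem pv_mem_replace_go (old new : List Char) (c : Char) :
    ∀ (fuel : Nat) (l acc : List Char), c ∈ PySem.Chars.replace.go old new fuel l acc →
      c ∈ l ∨ c ∈ new ∨ c ∈ acc := by
  intro fuel
  induction fuel with
  | zero => intro l acc h; simp [PySem.Chars.replace.go] at h; tauto
  | succ n ih =>
    intro l acc h
    match l with
    | [] => simp [PySem.Chars.replace.go] at h; tauto
    | ch :: t =>
      rw [PySem.Chars.replace.go] at h
      split at h
      · rcases ih _ _ h with h' | h' | h'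
        · exact Or.inl (List.mem_of_mem_drop h')
        · tauto
        · rcases List.mem_append.mp h' with h'' | h''
          · exact Or.inr (Or.inl (List.mem_reverse.mp h''))
          · tauto
      · rcases ih _ _ h with h' | h' | h'
        · exact Or.inl (List.mem_cons_of_mem _ h')
        · tauto
        · rcases List.mem_cons.mp h' with h'' | h''
          · subst h''; exact Or.inl (List.mem_cons_self)
          · tauto

theorem pv_mem_replace (s old new : List Char) (c : Char) (h : c ∈ PySem.Chars.replace s old new)
    (hold : old ≠ []) : c ∈ s ∨ c ∈ new := by
  unfold PySem.Chars.replace at h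
  rw [if_neg (by simpa using hold)] at h
  rcases pv_mem_replace_go old new c s.length s [] h with h' | h' | h' <;> simp_all

-- replacing a single character removes it (when the replacement avoids it)
theorem pv_not_mem_replace_go (a : Char) (new : List Char) (hnew : a ∉ new) :
    ∀ (fuel : Nat) (l acc : List Char), l.length ≤ fuel → a ∉ acc →
      a ∉ PySem.Chars.replace.go [a] new fuel l acc := by
  intro fuel
  induction fuel with
  | zero =>
    intro l acc hlen hacc
    have : l = [] := List.eq_nil_of_length_eq_zero (Nat.le_zero.mp hlen)
    subst this
    simp [PySem.Chars.replace.go, hacc]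
  | succ n ih =>
    intro l acc hlen hacc
    match l with
    | [] => simp [PySem.Chars.replace.go]; simpa using hacc
    | ch :: t =>
      rw [PySem.Chars.replace.go]
      split
      · next hpre =>
        apply ih
        · simpa using Nat.le_of_succ_le_succ (by simpa using hlen)
        · intro hmem
          rcases List.mem_append.mp hmem with h' | h'
          · exact hnew (List.mem_reverse.mp h')
          · exact hacc h'
      · next hpre =>
        apply ih
        · exact Nat.le_of_succ_le_succ (by simpa using hlen)
        · intro hmem
          rcases List.mem_cons.mp hmem with h' | h'
          · apply hpre; subst h'; simp [List.isPrefixOf]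
          · exact hacc h'

theorem pv_not_mem_replace (s : List Char) (a : Char) (new : List Char) (hnew : a ∉ new) :
    a ∉ PySem.Chars.replace s [a] new := by
  unfold PySem.Chars.replace
  rw [if_neg (by simp)]
  exact pv_not_mem_replace_go a new hnew s.length s [] (le_refl _) (by simp)

-- chars of split₀ tokens come from the source (or the pending word / accumulator)
theorem pv_mem_split₀_go (c : Char) :
    ∀ (l cur : List Char) (acc : List (List Char)) (tok : List Char),
      tok ∈ PySem.Chars.split₀.go l cur acc → c ∈ tok → c ∈ l ∨ c ∈ cur ∨ tok ∈ acc := by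
  intro l
  induction l with
  | nil =>
    intro cur acc tok htok hc
    rw [PySem.Chars.split₀.go] at htok
    split at htok
    · right; right; simpa using htok
    · simp at htok
      rcases htok with h | h
      · right; right; exact h
      · rw [h] at hc; right; left; simpa using hc
  | cons ch t ih =>
    intro cur acc tok htok hc
    rw [PySem.Chars.split₀.go] at htok
    split at htok
    · split at htok
      · rcases ih _ _ _ htok hc with h | h | h
        · exact Or.inl (List.mem_cons_of_mem _ h)
        · simp at h
        · tauto
      · rcases ih _ _ _ htok hc with h | h | h
        · exact Or.inl (List.mem_cons_of_mem _ h)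
        · simp at h
        · rcases List.mem_cons.mp h with h' | h'
          · subst h'; right; left; simpa using hc
          · tauto
    · rcases ih _ _ _ htok hc with h | h | h
      · exact Or.inl (List.mem_cons_of_mem _ h)
      · rcases List.mem_cons.mp h with h' | h'
        · subst h'; exact Or.inl List.mem_cons_self
        · tauto
      · tauto

theorem pv_mem_split₀ (s tok : List Char) (c : Char) (htok : tok ∈ PySem.Chars.split₀ s)
    (hc : c ∈ tok) : c ∈ s := by
  rcases pv_mem_split₀_go c s [] [] tok htok hc with h | h | h <;> simp_all

-- splitting on an absent separator returns the whole string
theorem pv_splitOn_go_absent (a : Char) :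
    ∀ (fuel : Nat) (l cur : List Char) (acc : List (List Char)), a ∉ l →
      PySem.Chars.splitOn.go [a] fuel l cur acc = acc.reverse ++ [cur.reverse ++ l] := by
  intro fuel
  induction fuel with
  | zero => intro l cur acc _; rw [PySem.Chars.splitOn.go]; simp
  | succ n ih =>
    intro l cur acc hl
    match l with
    | [] => rw [PySem.Chars.splitOn.go]; simp; omega
    | ch :: t =>
      rw [PySem.Chars.splitOn.go]
      have hne : ¬ ([a].isPrefixOf (ch :: t) = true) := by
        simp [List.isPrefixOf]
        intro h; exact hl (h ▸ List.mem_cons_self)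
      rw [if_neg hne, ih t (ch :: cur) acc (fun h => hl (List.mem_cons_of_mem _ h))]
      simp

theorem pv_splitOn_absent (s : List Char) (a : Char) (h : a ∉ s) :
    PySem.Chars.splitOn s [a] = [s] := by
  unfold PySem.Chars.splitOn
  rw [pv_splitOn_go_absent a _ s [] [] h]
  simp

-- members of the tokenizing foldl
theorem pv_mem_foldl_append {α β : Type} (h : α → List β) :
    ∀ (ts : List α) (acc : List β) (x : β), x ∈ ts.foldl (fun a t => a ++ h t) acc →
      x ∈ acc ∨ ∃ t ∈ ts, x ∈ h t := by
  intro ts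
  induction ts with
  | nil => intro acc x hx; simp at hx; tauto
  | cons t ts ih =>
    intro acc x hx
    rcases ih _ _ hx with h' | h'
    · rcases List.mem_append.mp h' with h'' | h''
      · tauto
      · exact Or.inr ⟨t, List.mem_cons_self, h''⟩
    · rcases h' with ⟨u, hu, hxu⟩
      exact Or.inr ⟨u, List.mem_cons_of_mem _ hu, hxu⟩

-- no token produced by the tokenizer contains '('
theorem pv_tokenize_no_paren (line : String) (tok : String) (h : tok ∈ pvTokenize line) :
    '(' ∉ tok.toList := by
  unfold pvTokenize at h
  rcases pv_mem_foldl_append _ _ _ _ h with h' | ⟨t, _, htok⟩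
  · simp at h'
  · intro hc
    unfold PySem.Str.split₀ at htok
    rcases List.mem_map.mp htok with ⟨cs, hcs, rfl⟩
    have hc' : '(' ∈ cs := by simpa using hc
    have hmem := pv_mem_split₀ _ _ _ hcs hc'
    -- cs chars come from replace(replace(replace t ",", " "), "(", " "), ")", " ")
    have h1 : '(' ∉ (PySem.Str.replace (PySem.Str.replace t "," " ") "(" " ").toList := by
      unfold PySem.Str.replace
      rw [String.toList_ofList]
      exact pv_not_mem_replace _ '(' _ (by simp)
    have h2 : '(' ∉ (PySem.Str.replace (PySem.Str.replace (PySem.Str.replace t "," " ") "(" " ") ")" " ").toList := by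
      unfold PySem.Str.replace
      rw [String.toList_ofList]
      intro hmem2
      rcases pv_mem_replace _ _ _ _ hmem2 (by simp) with h' | h'
      · exact h1 h'
      · simp at h'
    exact h2 hmem

-- A's lw/sw block never changes the tokens: they cannot contain '('
theorem pv_lwsw_dead (toks : List String) (hne : toks ≠ [])
    (hparen : ∀ tok ∈ toks, '(' ∉ tok.toList) :
    pvLwswFix toks = toks := by
  unfold pvLwswFix
  split
  · have hlast : PySem.List.pyGetD toks (-1) "" = toks.getLast hne :=
      PySem.List.pyGetD_neg_one toks "" hne
    have hnp : '(' ∉ (toks.getLast hne).toList := hparen _ (List.getLast_mem hne)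
    have hsplit : PySem.Str.split? (PySem.List.pyGetD toks (-1) "") "(" =
        some [String.ofList (toks.getLast hne).toList] := by
      rw [hlast]
      unfold PySem.Str.split? PySem.Chars.split?
      rw [if_neg (by decide)]
      rw [show ("(" : String).toList = ['('] from rfl]
      rw [pv_splitOn_absent _ _ (by simpa using hnp)]
      simp
    rw [hsplit]
    simp
  · rfl

-- one synchronized step: B's state tracks (A2's instructions, A1's labels, A2's variables,
-- A2's var_address, the common memory_address), and the two memory counters stay equal
set_option maxHeartbeats 1000000 in
theorem pv_step_sync (line : String) (d1 d2 : PySem.Dict String Int)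
    (ins : List (List String)) (va m : Int) :
    pvStepB (ins, d1, d2, va, m) line =
      ((pvStepA2 (d2, ins, va, m) line).2.1, (pvStepA1 (d1, m) line).1,
       (pvStepA2 (d2, ins, va, m) line).1, (pvStepA2 (d2, ins, va, m) line).2.2.1,
       (pvStepA2 (d2, ins, va, m) line).2.2.2) ∧
    (pvStepA1 (d1, m) line).2 = (pvStepA2 (d2, ins, va, m) line).2.2.2 := by
  simp only [pvStepB, pvStepA1, pvStepA2]
  cases hskip : (PySem.Str.strip line == "" || PySem.Str.startswith (PySem.Str.strip line) "#") with
  | true =>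
    simp only [Bool.true_or, if_true]
    constructor <;> trivial
  | false =>
    cases hvar : PySem.Str.startswith (PySem.Str.strip line) "var" with
    | true =>
      simp only [Bool.or_true, Bool.false_eq_true, if_false, if_true]
      constructor <;> trivial
    | false =>
      simp only [Bool.or_false, Bool.false_eq_true, if_false]
      have hparen : ∀ tok ∈ pvTokenize (pvSplitLabel (PySem.Str.strip line)).2, '(' ∉ tok.toList :=
        fun tok h => pv_tokenize_no_paren _ tok h
      generalize pvTokenize (pvSplitLabel (PySem.Str.strip line)).2 = toks at hparen ⊢
      cases htok : toks.isEmpty with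
      | true =>
        simp only [if_true]
        constructor <;> trivial
      | false =>
        simp only [Bool.false_eq_true, if_false]
        rw [pv_lwsw_dead toks (by intro h; subst h; simp at htok) hparen]
        exact ⟨rfl, trivial⟩

-- the fold-level invariant
set_option maxHeartbeats 2000000 in
theorem pv_fold_sync (lines : List String) :
    ∀ (d1 d2 : PySem.Dict String Int) (ins : List (List String)) (va m : Int),
      lines.foldl pvStepB (ins, d1, d2, va, m) =
        ((lines.foldl pvStepA2 (d2, ins, va, m)).2.1, (lines.foldl pvStepA1 (d1, m)).1,
         (lines.foldl pvStepA2 (d2, ins, va, m)).1, (lines.foldl pvStepA2 (d2, ins, va, m)).2.2.1,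
         (lines.foldl pvStepA2 (d2, ins, va, m)).2.2.2) := by
  induction lines with
  | nil => intro d1 d2 ins va m; rfl
  | cons line rest ih =>
    intro d1 d2 ins va m
    obtain ⟨hB, hm⟩ := pv_step_sync line d1 d2 ins va m
    have hA1 : pvStepA1 (d1, m) line =
        ((pvStepA1 (d1, m) line).1, (pvStepA2 (d2, ins, va, m) line).2.2.2) := by rw [← hm]
    rw [List.foldl_cons, List.foldl_cons, List.foldl_cons, hA1, hB]
    exact ih _ _ _ _ _

-- ===== VERDICT (by name: the statement is the Claim_ definition above) =====
set_option maxHeartbeats 1000000 in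
theorem parse_assembly_spec : Claim_equal_parse_assembly := by
  intro lines _ _
  unfold Spec_parse_assembly parse_assembly parse_assembly_alt
  rw [pv_fold_sync lines PySem.Dict.empty PySem.Dict.empty [] 256 0]
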